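-- pv_equiv track=rewrite | github.com/ksubowu/Pept-X | seq2smi_v2.py | _shift_indices_after_removal
-- ===== SOURCE A (Python) =====
-- from typing import Dict, List, Tuple, Optional, Set
--
-- def _shift_indices_after_removal(
--     residue_map: dict[int, int], removed: List[int]
-- ) -> dict[int, int]:
--     removed_sorted = sorted(set(removed))
--     updated: dict[int, int] = {}
--     for res_idx, atom_idx in residue_map.items():
--         if atom_idx in removed_sorted:
--             continue
--         shift = sum(1 for r in removed_sorted if r < atom_idx)
--         updated[res_idx] = atom_idx - shift
--     return updated
-- ===== SOURCE B (Python) =====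
-- from typing import Dict, List, Tuple, Optional, Set
--
-- def _shift_indices_after_removal(
--     residue_map: dict[int, int], removed: List[int]
-- ) -> dict[int, int]:
--     removed_set = set(removed)
--     rs = sorted(removed_set)
--
--     def less_count(x: int) -> int:
--         # hand-written bisect_left: number of removed indices < x
--         lo, hi = 0, len(rs)
--         while lo < hi:
--             mid = (lo + hi) // 2
--             if rs[mid] < x:
--                 lo = mid + 1
--             else:
--                 hi = mid
--         return lo
--
--     return {res: atom - less_count(atom)
--             for res, atom in residue_map.items()
--             if atom not in removed_set}
-- ===== Notes on version B (the rewrite author's own statement) =====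
-- stated objective: faster
-- what changed: replaces the per-entry linear membership test and linear shift-count over the sorted removed list with an O(1) set membership test and a hand-written binary search (bisect_left) for the shift count
import Mathlib
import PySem

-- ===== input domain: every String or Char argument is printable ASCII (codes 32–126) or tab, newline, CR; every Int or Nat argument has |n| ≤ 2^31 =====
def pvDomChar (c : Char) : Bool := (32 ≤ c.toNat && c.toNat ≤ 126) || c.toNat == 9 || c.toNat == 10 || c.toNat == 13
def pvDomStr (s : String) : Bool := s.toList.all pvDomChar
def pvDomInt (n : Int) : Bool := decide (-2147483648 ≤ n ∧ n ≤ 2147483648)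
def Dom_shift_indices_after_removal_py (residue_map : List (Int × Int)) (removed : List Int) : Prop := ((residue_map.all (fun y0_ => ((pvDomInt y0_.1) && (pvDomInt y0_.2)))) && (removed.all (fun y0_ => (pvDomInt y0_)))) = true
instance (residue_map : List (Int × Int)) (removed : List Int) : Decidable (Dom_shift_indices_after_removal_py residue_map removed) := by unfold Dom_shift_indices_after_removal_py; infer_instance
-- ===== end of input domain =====

-- B replaces A's per-entry linear scans of the sorted removed list (membership + shift count)
-- by an O(1) set membership test and a hand-written binary search; objective: faster.

-- ===== PORT A =====
def shift_indices_after_removal_py (residue_map : List (Int × Int)) (removed : List Int) : List (Int × Int) :=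
  let removed_sorted := PySem.List.sorted (PySem.Set.ofList removed) (fun x => x) false
  (residue_map.foldl (fun (updated : PySem.Dict Int Int) item =>
    if removed_sorted.contains item.2 then updated
    else
      let shift : Int := removed_sorted.foldl (fun acc r => if r < item.2 then acc + 1 else acc) 0
      PySem.Dict.insert updated item.1 (item.2 - shift)) PySem.Dict.empty).items

-- ===== PORT B =====
-- hand-written bisect_left loop from Source B (lo/hi while-loop), as structural recursion on hi - lo
def pvLessCount (rs : List Int) (x : Int) (lo hi : Nat) : Nat :=
  if lo < hi then
    let mid := (lo + hi) / 2
    if rs.getD mid 0 < x then pvLessCount rs x (mid + 1) hi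
    else pvLessCount rs x lo mid
  else lo
termination_by hi - lo
decreasing_by all_goals omega

def shift_indices_after_removal_py_alt (residue_map : List (Int × Int)) (removed : List Int) : List (Int × Int) :=
  let removed_set := PySem.Set.ofList removed
  let rs := PySem.List.sorted removed_set (fun x => x) false
  (residue_map.foldl (fun (updated : PySem.Dict Int Int) item =>
    if removed_set.contains item.2 then updated
    else PySem.Dict.insert updated item.1 (item.2 - (pvLessCount rs item.2 0 rs.length : Int))) PySem.Dict.empty).items

-- ===== PRECONDITION & SPEC =====
def Spec_shift_indices_after_removal_py (residue_map : List (Int × Int)) (removed : List Int) (out : List (Int × Int)) : Prop := out = shift_indices_after_removal_py_alt residue_map removed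
instance (residue_map : List (Int × Int)) (removed : List Int) (out : List (Int × Int)) : Decidable (Spec_shift_indices_after_removal_py residue_map removed out) := by unfold Spec_shift_indices_after_removal_py; infer_instance

-- ===== CLAIM (what is proved, stated in full; the proofs are below) =====
def Claim_equal_shift_indices_after_removal_py : Prop := ∀ (residue_map : List (Int × Int)) (removed : List Int), Dom_shift_indices_after_removal_py residue_map removed → Spec_shift_indices_after_removal_py residue_map removed (shift_indices_after_removal_py residue_map removed)

-- ===== LEMMAS AND PROOFS =====

-- On a nondecreasing list, position i holds an element < x iff i is below the count of elements < x.
lemma countP_lt_char (x : Int) (rs : List Int) (hs : rs.Pairwise (· ≤ ·)) :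
    ∀ i (h : i < rs.length), (rs[i] < x ↔ i < rs.countP (fun r => decide (r < x))) := by
  induction rs with
  | nil => intro i h; exact absurd h (by simp)
  | cons a t ih =>
    rcases List.pairwise_cons.mp hs with ⟨ha, ht⟩
    intro i h
    by_cases hax : a < x
    · have hcount : (a :: t).countP (fun r => decide (r < x)) =
          t.countP (fun r => decide (r < x)) + 1 := by
        simp [hax]
      cases i with
      | zero => simpa [hcount] using hax
      | succ j =>
        have hj : j < t.length := by simpa using h
        have := ih ht j hj
        simpa [hcount] using this
    · have ht0 : t.countP (fun r => decide (r < x)) = 0 := by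
        rw [List.countP_eq_zero]
        intro r hr
        have : a ≤ r := ha r hr
        simp; omega
      have hcount : (a :: t).countP (fun r => decide (r < x)) = 0 := by
        simp [hax, ht0]
      rw [hcount]
      cases i with
      | zero => simpa using hax
      | succ j =>
        have hj : j < t.length := by simpa using h
        have hle : a ≤ t[j] := ha _ (List.getElem_mem hj)
        simp; omega

-- The binary-search loop computes the count of elements < x, given bracketing invariants.
lemma pvLessCount_eq (rs : List Int) (x : Int) (hs : rs.Pairwise (· ≤ ·)) :
    ∀ lo hi, hi ≤ rs.length → lo ≤ rs.countP (fun r => decide (r < x)) →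
      rs.countP (fun r => decide (r < x)) ≤ hi →
      pvLessCount rs x lo hi = rs.countP (fun r => decide (r < x)) := by
  intro lo hi
  induction hlen : hi - lo using Nat.strong_induction_on generalizing lo hi with
  | _ n ih =>
    intro hhi hlo hphi
    rw [pvLessCount]
    by_cases hlt : lo < hi
    · simp only [hlt, if_true]
      have hmid1 : lo ≤ (lo + hi) / 2 := by omega
      have hmid2 : (lo + hi) / 2 < hi := by omega
      have hmlen : (lo + hi) / 2 < rs.length := by omega
      have hget : rs.getD ((lo + hi) / 2) 0 = rs[(lo + hi) / 2] := List.getD_eq_getElem rs 0 hmlen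
      have hchar := countP_lt_char x rs hs ((lo + hi) / 2) hmlen
      rw [hget]
      by_cases hc : rs[(lo + hi) / 2] < x
      · simp only [hc, if_true]
        exact ih (hi - ((lo + hi) / 2 + 1)) (by omega) _ _ rfl hhi (by omega) hphi
      · simp only [hc, if_false]
        exact ih ((lo + hi) / 2 - lo) (by omega) _ _ rfl (by omega) hlo (by omega)
    · simp only [hlt, if_false]
      omega

lemma contains_eq_of_perm (l₁ l₂ : List Int) (h : l₁.Perm l₂) (a : Int) :
    l₁.contains a = l₂.contains a := by
  exact List.Perm.contains_eq h

-- ===== VERDICT (by name: the statement is the Claim_ definition above) =====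
theorem shift_indices_after_removal_py_spec : Claim_equal_shift_indices_after_removal_py := by
  intro residue_map removed _
  unfold Spec_shift_indices_after_removal_py
  unfold shift_indices_after_removal_py shift_indices_after_removal_py_alt
  apply congrArg PySem.Dict.items
  apply PySem.List.foldl_congr_mem
  intro updated item _
  have hperm := PySem.List.sorted_perm (PySem.Set.ofList removed) (fun x => x) false
  have hpair : (PySem.List.sorted (PySem.Set.ofList removed) (fun x => x) false).Pairwise (· ≤ ·) :=
    PySem.List.sorted_pairwise (PySem.Set.ofList removed) (fun x => x)
  rw [contains_eq_of_perm _ _ hperm]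
  have hshift : (PySem.List.sorted (PySem.Set.ofList removed) (fun x => x) false).foldl
      (fun acc r => if r < item.2 then acc + 1 else acc) (0 : Int) =
      ((pvLessCount (PySem.List.sorted (PySem.Set.ofList removed) (fun x => x) false) item.2 0
        (PySem.List.sorted (PySem.Set.ofList removed) (fun x => x) false).length : Nat) : Int) := by
    rw [PySem.List.foldl_ite_add_one, pvLessCount_eq _ _ hpair 0 _ le_rfl (Nat.zero_le _)
      List.countP_le_length]
    simp
  rw [hshift]
  rfl
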